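-- pv_equiv track=rewrite | github.com/Ai-Whisperers/ultrametric-antigen-AI | deliverables/partners/alejandra_rojas/research/e_protein_dhf/test3b_e_protein_dhf.py | codon_to_index
-- ===== SOURCE A (Python) =====
-- def codon_to_index(codon: str) -> int | None:
--     """Convert codon to index (0-63)."""
--     bases = {'A': 0, 'C': 1, 'G': 2, 'T': 3, 'U': 3}
--     if len(codon) != 3:
--         return None
--     idx = 0
--     for i, base in enumerate(codon.upper()):
--         if base not in bases:
--             return None
--         idx += bases[base] * (4 ** (2 - i))
--     return idx
-- ===== SOURCE B (Python) =====
-- def codon_to_index(codon: str) -> int | None: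
--     """Convert codon to index (0-63)."""
--     if len(codon) != 3:
--         return None
--     up = codon.upper()
--     if any(ch not in 'ACGTU' for ch in up):
--         return None
--     return int(up.translate(str.maketrans('ACGTU', '01233')), 4)
-- ===== Notes on version B (the rewrite author's own statement) =====
-- stated objective: idiomatic
-- what changed: Replaces the per-position weighted accumulation loop (bases[base] * 4**(2-i)) with validation followed by a character translation table and a single base-4 int() parse.
import Mathlib
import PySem

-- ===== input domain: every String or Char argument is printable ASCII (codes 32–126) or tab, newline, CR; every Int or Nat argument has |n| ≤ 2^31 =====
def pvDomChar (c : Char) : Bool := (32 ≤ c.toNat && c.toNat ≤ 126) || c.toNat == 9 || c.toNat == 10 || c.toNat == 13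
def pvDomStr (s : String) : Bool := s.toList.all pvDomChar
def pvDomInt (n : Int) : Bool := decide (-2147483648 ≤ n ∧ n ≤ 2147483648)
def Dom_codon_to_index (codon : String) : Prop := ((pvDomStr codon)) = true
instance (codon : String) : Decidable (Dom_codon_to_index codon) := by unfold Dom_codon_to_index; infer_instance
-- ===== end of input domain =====

-- B replaces A's weighted-power accumulation loop with validation plus a translate-then-parse-base-4 formulation (idiomatic; same cost).

-- ===== PORT A =====
-- the dict 'bases'
def pvBasesA : PySem.Dict Char Int :=
  PySem.Dict.mk [('A', 0), ('C', 1), ('G', 2), ('T', 3), ('U', 3)]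

-- the 'for i, base in enumerate(...)' loop with early return None
def pvLoopA : Nat → List Char → Int → Option Int
  | _, [], idx => some idx
  | i, base :: rest, idx =>
    match pvBasesA.get? base with
    | none => none
    | some v => pvLoopA (i + 1) rest (idx + v * (4 : Int) ^ (2 - i))

def codon_to_index (codon : String) : Option Int :=
  if PySem.Str.len codon ≠ 3 then none
  else pvLoopA 0 (PySem.Str.upper codon).toList 0

-- ===== PORT B =====
-- str.maketrans('ACGTU', '01233') as a character map (translate leaves other chars unchanged)
def pvTransB (c : Char) : Char :=
  if c = 'A' then '0' else if c = 'C' then '1' else if c = 'G' then '2'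
  else if c = 'T' then '3' else if c = 'U' then '3' else c

-- int(s, 4) on a validated digit string: Horner over ord(c) - ord('0')
def pvParse4B (cs : List Char) : Int :=
  cs.foldl (fun acc c => acc * 4 + ((c.toNat : Int) - 48)) 0

def codon_to_index_alt (codon : String) : Option Int :=
  if PySem.Str.len codon ≠ 3 then none
  else
    let up := (PySem.Str.upper codon).toList
    if up.any (fun ch => ¬ ch ∈ ['A', 'C', 'G', 'T', 'U']) then none
    else some (pvParse4B (up.map pvTransB))

-- ===== PRECONDITION & SPEC =====
def Spec_codon_to_index (codon : String) (out : Option Int) : Prop := out = codon_to_index_alt codon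
instance (codon : String) (out : Option Int) : Decidable (Spec_codon_to_index codon out) := by unfold Spec_codon_to_index; infer_instance

-- ===== CLAIM (what is proved, stated in full; the proofs are below) =====
def Claim_equal_codon_to_index : Prop := ∀ (codon : String), Dom_codon_to_index codon → Spec_codon_to_index codon (codon_to_index codon)

-- ===== LEMMAS AND PROOFS =====

-- A's dict lookup agrees with B's "valid then translated digit" reading, char by char
theorem pvBases_get_eq (c : Char) :
    pvBasesA.get? c =
      if c ∈ ['A', 'C', 'G', 'T', 'U'] then some (((pvTransB c).toNat : Int) - 48) else none := by
  by_cases hA : c = 'A'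
  · subst hA; decide
  · by_cases hC : c = 'C'
    · subst hC; decide
    · by_cases hG : c = 'G'
      · subst hG; decide
      · by_cases hT : c = 'T'
        · subst hT; decide
        · by_cases hU : c = 'U'
          · subst hU; decide
          · simp [pvBasesA, Ne.symm hA, Ne.symm hC, Ne.symm hG, Ne.symm hT, Ne.symm hU, hA, hC, hG, hT, hU, PySem.Dict.get?]

theorem codon_three (a b c : Char) :
    pvLoopA 0 [a, b, c] 0 =
      (if [a, b, c].any (fun ch => ¬ ch ∈ ['A', 'C', 'G', 'T', 'U']) then none
       else some (pvParse4B ([a, b, c].map pvTransB))) := by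
  simp only [pvLoopA, pvBases_get_eq, pvParse4B, List.any, List.map, List.foldl]
  split_ifs with h1 h2 h3 <;>
    simp_all <;> ring

-- ===== VERDICT (by name: the statement is the Claim_ definition above) =====
theorem codon_to_index_spec : Claim_equal_codon_to_index := by
  intro codon _
  unfold Spec_codon_to_index codon_to_index codon_to_index_alt
  by_cases hlen : PySem.Str.len codon ≠ 3
  · rw [if_pos hlen, if_pos hlen]
  · rw [if_neg hlen, if_neg hlen]
    push_neg at hlen
    have h3 : (PySem.Str.upper codon).toList.length = 3 := by
      have h0 := PySem.Str.len_eq codon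
      simp [PySem.Str.toList_upper, PySem.Chars.upper]
      rw [h0] at hlen
      exact_mod_cast congrArg Int.toNat hlen
    obtain ⟨a, b, c, habc⟩ := List.length_eq_three.mp h3
    rw [habc, codon_three]
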